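-- pv_equiv track=rewrite | github.com/wyf401/Few-SF-BERT | BERT-SF(ET+FL)/evaluate.py | reconstruct_slot_bound
-- ===== SOURCE A (Python) =====
-- def reconstruct_slot_bound(slot_output, slot_ids, slot_label_list):
--     # 1. 排除不需要的idx
--     real_pred = []
--     for p_list,l_list in zip(slot_output, slot_ids):
--         single_pred = []
--         for p,l in zip(p_list,l_list):
--             if l == -100:
--                 continue
--             single_pred.append(slot_label_list[p])
--         real_pred.append(single_pred)
--     # 2.恢复真实标签
--     final_pred = []
--     for single_pred in real_pred:
--         final_single_pred = ['O'] if single_pred[0] == 'O' else ['B-'+single_pred[0]]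
--         for idx in range(1,len(single_pred)):
--             cur_pred = single_pred[idx]
--             pre_pred = single_pred[idx-1]
--             if cur_pred == 'O':
--                 final_single_pred.append('O')
--             else:
--                 if cur_pred == pre_pred:
--                     final_single_pred.append('I-'+cur_pred)
--                 else:
--                     final_single_pred.append('B-'+cur_pred)
--         final_pred.append(final_single_pred)
--     return final_pred
-- ===== SOURCE B (Python) =====
-- def reconstruct_slot_bound(slot_output, slot_ids, slot_label_list):
--     # 1. drop positions labelled -100
--     real_pred = [[slot_label_list[p] for p, l in zip(p_list, l_list) if l != -100]
--                  for p_list, l_list in zip(slot_output, slot_ids)]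
--     # 2. rebuild BIO tags by run-length scanning each sequence
--     final_pred = []
--     for single_pred in real_pred:
--         seq = []
--         i = 0
--         while i < len(single_pred):
--             label = single_pred[i]
--             j = i
--             while j < len(single_pred) and single_pred[j] == label:
--                 j += 1
--             n = j - i
--             if label == 'O':
--                 seq.extend(['O'] * n)
--             else:
--                 seq.append('B-' + label)
--                 seq.extend(['I-' + label] * (n - 1))
--             i = j
--         final_pred.append(seq)
--     return final_pred
-- ===== Notes on version B (the rewrite author's own statement) =====
-- stated objective: alternative
-- what changed: Replaces the index-based compare-current-to-previous reconstruction loop with a run-length two-pointer scan that emits each maximal run of equal labels at once ('O'*n, or 'B-'+label then 'I-'+label*(n-1)).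
-- crash fix: When every surviving label of some sequence is filtered out by -100 (and all used label indices are valid), A raises IndexError on single_pred[0] while B naturally returns an empty list for that sequence. — e.g. on reconstruct_slot_bound([[0]], [[-100]], ["O"]): A raises IndexError, B returns [[]]
import Mathlib
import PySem

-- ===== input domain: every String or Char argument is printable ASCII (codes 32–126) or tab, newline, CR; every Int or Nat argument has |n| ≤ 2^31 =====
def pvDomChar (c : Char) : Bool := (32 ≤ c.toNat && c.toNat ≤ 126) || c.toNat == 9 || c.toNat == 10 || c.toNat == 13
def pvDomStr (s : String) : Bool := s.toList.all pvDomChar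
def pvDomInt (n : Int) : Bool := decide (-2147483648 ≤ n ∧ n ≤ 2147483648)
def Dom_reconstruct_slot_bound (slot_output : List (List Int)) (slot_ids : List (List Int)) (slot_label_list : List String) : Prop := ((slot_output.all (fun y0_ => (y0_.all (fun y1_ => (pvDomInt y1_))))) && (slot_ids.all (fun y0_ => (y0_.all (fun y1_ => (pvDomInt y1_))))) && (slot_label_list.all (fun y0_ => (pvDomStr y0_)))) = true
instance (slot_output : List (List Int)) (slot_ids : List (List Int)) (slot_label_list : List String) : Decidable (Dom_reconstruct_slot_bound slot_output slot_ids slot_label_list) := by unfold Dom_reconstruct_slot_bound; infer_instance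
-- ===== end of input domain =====

-- B rebuilds the BIO tags with a run-length two-pointer scan over each filtered sequence instead of
-- A's index loop comparing each position to the previous one; same cost, different decomposition.

-- ===== PORT A =====
def reconstruct_slot_bound (slot_output : List (List Int)) (slot_ids : List (List Int)) (slot_label_list : List String) : List (List String) :=
  -- 1. drop -100 positions, look the rest up in slot_label_list
  let real_pred : List (List String) :=
    (slot_output.zip slot_ids).foldl (fun acc pr =>
      acc ++ [(pr.1.zip pr.2).foldl (fun sacc q =>
        if q.2 = -100 then sacc
        else sacc ++ [PySem.List.pyGetD slot_label_list q.1 ""]) []]) []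
  -- 2. rebuild the real tags (single_pred[0] raises IndexError on an empty sequence: excluded by Pre_)
  real_pred.foldl (fun acc single_pred =>
    let h0 := PySem.List.pyGetD single_pred 0 ""
    let init : List String := if h0 = "O" then ["O"] else ["B-" ++ h0]
    acc ++ [(PySem.List.pyRange 1 (single_pred.length : Int) 1).foldl (fun f idx =>
      let cur := PySem.List.pyGetD single_pred idx ""
      let pre := PySem.List.pyGetD single_pred (idx - 1) ""
      f ++ [if cur = "O" then "O"
            else if cur = pre then "I-" ++ cur else "B-" ++ cur]) init]) []

-- ===== PORT B =====
-- one maximal run of n equal labels: 'O'*n, or 'B-'+lab then 'I-'+lab*(n-1)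
def pvEmitRun (lab : String) (n : Nat) : List String :=
  if lab = "O" then List.replicate n "O"
  else ("B-" ++ lab) :: List.replicate (n - 1) ("I-" ++ lab)

-- the two-pointer while loops of Source B: peel off one maximal run at a time
def pvBioRuns : List String → List String
  | [] => []
  | x :: rest =>
      pvEmitRun x (1 + (rest.takeWhile (· == x)).length) ++ pvBioRuns (rest.dropWhile (· == x))
  termination_by xs => xs.length
  decreasing_by
    simp only [List.length_cons]
    exact Nat.lt_succ_of_le (List.length_dropWhile_le _ _)

def reconstruct_slot_bound_alt (slot_output : List (List Int)) (slot_ids : List (List Int)) (slot_label_list : List String) : List (List String) :=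
  let real_pred : List (List String) :=
    (slot_output.zip slot_ids).map (fun pr =>
      ((pr.1.zip pr.2).filter (fun q => q.2 != -100)).map
        (fun q => PySem.List.pyGetD slot_label_list q.1 ""))
  real_pred.map pvBioRuns

-- ===== PRECONDITION & SPEC =====
-- Pre_ excludes exactly the inputs on which the Python A raises IndexError: a used label index p
-- outside slot_label_list's Python index range, or a sequence whose surviving labels are empty.
def Pre_reconstruct_slot_bound (slot_output : List (List Int)) (slot_ids : List (List Int)) (slot_label_list : List String) : Prop :=
  ∀ pr ∈ slot_output.zip slot_ids,
    (∃ q ∈ pr.1.zip pr.2, q.2 ≠ -100) ∧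
    ∀ q ∈ pr.1.zip pr.2, q.2 ≠ -100 → PySem.Raise.InRange slot_label_list.length q.1
instance (slot_output : List (List Int)) (slot_ids : List (List Int)) (slot_label_list : List String) : Decidable (Pre_reconstruct_slot_bound slot_output slot_ids slot_label_list) := by unfold Pre_reconstruct_slot_bound; infer_instance

def pvWitness_reconstruct_slot_bound : List (List Int) × List (List Int) × List String :=
  ([[0, 1, 1], [0]], [[0, 0, 0], [0]], ["O", "X"])

-- When every surviving label of some sequence is filtered out by -100 (and all used label indices
-- are valid), A raises IndexError on single_pred[0] while B naturally returns an empty list there.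
def Raises_reconstruct_slot_bound (slot_output : List (List Int)) (slot_ids : List (List Int)) (slot_label_list : List String) : Prop :=
  (∀ pr ∈ slot_output.zip slot_ids, ∀ q ∈ pr.1.zip pr.2, q.2 ≠ -100 → PySem.Raise.InRange slot_label_list.length q.1) ∧
  (∃ pr ∈ slot_output.zip slot_ids, ∀ q ∈ pr.1.zip pr.2, q.2 = -100)
instance (slot_output : List (List Int)) (slot_ids : List (List Int)) (slot_label_list : List String) : Decidable (Raises_reconstruct_slot_bound slot_output slot_ids slot_label_list) := by unfold Raises_reconstruct_slot_bound; infer_instance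

def pvRaiseWitness_reconstruct_slot_bound : List (List Int) × List (List Int) × List String :=
  ([[0]], [[-100]], ["O"])
def pvRaiseWitnessOut_reconstruct_slot_bound : List (List String) := [[]]

def Spec_reconstruct_slot_bound (slot_output : List (List Int)) (slot_ids : List (List Int)) (slot_label_list : List String) (out : List (List String)) : Prop := out = reconstruct_slot_bound_alt slot_output slot_ids slot_label_list
instance (slot_output : List (List Int)) (slot_ids : List (List Int)) (slot_label_list : List String) (out : List (List String)) : Decidable (Spec_reconstruct_slot_bound slot_output slot_ids slot_label_list out) := by unfold Spec_reconstruct_slot_bound; infer_instance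

-- ===== CLAIM (what is proved, stated in full; the proofs are below) =====
def Claim_equal_reconstruct_slot_bound : Prop := ∀ (slot_output : List (List Int)) (slot_ids : List (List Int)) (slot_label_list : List String), Dom_reconstruct_slot_bound slot_output slot_ids slot_label_list → Pre_reconstruct_slot_bound slot_output slot_ids slot_label_list → Spec_reconstruct_slot_bound slot_output slot_ids slot_label_list (reconstruct_slot_bound slot_output slot_ids slot_label_list)

def Claim_raises_reconstruct_slot_bound : Prop := (∀ (slot_output : List (List Int)) (slot_ids : List (List Int)) (slot_label_list : List String), Dom_reconstruct_slot_bound slot_output slot_ids slot_label_list → Raises_reconstruct_slot_bound slot_output slot_ids slot_label_list → ¬ Pre_reconstruct_slot_bound slot_output slot_ids slot_label_list) ∧ (Dom_reconstruct_slot_bound (pvRaiseWitness_reconstruct_slot_bound.1) (pvRaiseWitness_reconstruct_slot_bound.2.1) (pvRaiseWitness_reconstruct_slot_bound.2.2) ∧ Raises_reconstruct_slot_bound (pvRaiseWitness_reconstruct_slot_bound.1) (pvRaiseWitness_reconstruct_slot_bound.2.1) (pvRaiseWitness_reconstruct_slot_bound.2.2) ∧ reconstruct_slot_bound_alt (pvRaiseWitness_reconstruct_slot_bound.1)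 (pvRaiseWitness_reconstruct_slot_bound.2.1) (pvRaiseWitness_reconstruct_slot_bound.2.2) = pvRaiseWitnessOut_reconstruct_slot_bound)

-- ===== LEMMAS AND PROOFS =====

-- A's per-position tag decision (pre = previous label, cur = current label)
def pvStep (pre cur : String) : String :=
  if cur = "O" then "O" else if cur = pre then "I-" ++ cur else "B-" ++ cur

-- A's stage-2 loop as a structural recursion on the tail, carrying the previous label
def pvRecA : String → List String → List String
  | _, [] => []
  | prev, c :: t => pvStep prev c :: pvRecA c t

def pvInit (h : String) : List String := if h = "O" then ["O"] else ["B-" ++ h]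

-- stage 1: A's filtering foldl is the filter-then-map comprehension of B
theorem pv_filt {α : Type} (f : Int → α) :
    ∀ (l : List (Int × Int)) (init : List α),
      l.foldl (fun sacc q => if q.2 = -100 then sacc else sacc ++ [f q.1]) init
        = init ++ (l.filter (fun q => q.2 != -100)).map (fun q => f q.1) := by
  intro l
  induction l with
  | nil => simp
  | cons q t ih =>
      intro init
      by_cases h : q.2 = -100 <;> simp [List.foldl_cons, h, ih]

-- adjacent-pair view of the index loop, over List.range / getD
theorem pv_rangeAdj (d : String) :
    ∀ (t : List String) (h : String),
      (List.range t.length).map (fun k => pvStep ((h :: t).getD k d) ((h :: t).getD (k + 1) d))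
        = pvRecA h t := by
  intro t
  induction t with
  | nil => simp [pvRecA]
  | cons c t' ih =>
      intro h
      rw [List.length_cons, List.range_succ_eq_map]
      simp only [List.map_cons, List.map_map]
      have : ((List.range t'.length).map (Nat.succ)).map
            (fun k => pvStep ((h :: c :: t').getD k d) ((h :: c :: t').getD (k + 1) d))
          = (List.range t'.length).map
            (fun k => pvStep ((c :: t').getD k d) ((c :: t').getD (k + 1) d)) := by
        simp [List.map_map, Function.comp, List.getD]
      simp only [List.map_map] at this ⊢
      rw [this, ih c]
      simp [pvRecA, List.getD]

-- A's index loop over pyRange equals pvRecA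
theorem pv_idxLoop (t : List String) (h : String) (init : List String) :
    (PySem.List.pyRange 1 (((h :: t).length : Nat) : Int) 1).foldl (fun f idx =>
        f ++ [pvStep (PySem.List.pyGetD (h :: t) (idx - 1) "") (PySem.List.pyGetD (h :: t) idx "")]) init
      = init ++ pvRecA h t := by
  rw [PySem.List.foldl_append_singleton_eq_map]
  congr 1
  rw [PySem.List.pyRange_one]
  have hlen : (((((h :: t).length : Nat) : Int)) - 1).toNat = t.length := by
    simp [List.length_cons]
  rw [hlen, List.map_map]
  rw [← pv_rangeAdj ""]
  apply List.map_congr_left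
  intro k hk
  have h2 : (1 : Int) + (k : Int) = ((k + 1 : Nat) : Int) := by push_cast; ring
  have h3 : ((k + 1 : Nat) : Int) - 1 = ((k : Nat) : Int) := by push_cast; ring
  simp only [Function.comp, h2, h3, PySem.List.pyGetD_natCast]

-- the run-length grouping step of B absorbs A's compare-to-previous recursion
theorem pv_main : ∀ (t : List String) (h : String),
    pvInit h ++ pvRecA h t = pvBioRuns (h :: t) := by
  intro t
  induction t with
  | nil =>
      intro h
      rw [pvBioRuns]
      by_cases hO : h = "O" <;>
        simp [pvBioRuns, pvEmitRun, pvInit, pvRecA, hO]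
  | cons c t' ih =>
      intro h
      by_cases hc : c = h
      · subst hc
        rw [pvBioRuns]
        have ihh := ih c
        rw [pvBioRuns] at ihh
        simp only [List.takeWhile_cons, List.dropWhile_cons, beq_self_eq_true, if_true,
          List.length_cons]
        by_cases hO : c = "O"
        · subst hO
          simp only [pvEmitRun, pvInit, pvRecA, pvStep, if_true,
            List.cons_append, List.nil_append] at ihh ⊢
          rw [show 1 + ((List.takeWhile (· == "O") t').length + 1)
                = (1 + (List.takeWhile (· == "O") t').length) + 1 by omega,
              List.replicate_succ, List.cons_append, ihh]
        · have hrec : pvRecA c t'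
              = List.replicate (1 + (List.takeWhile (· == c) t').length - 1) ("I-" ++ c)
                ++ pvBioRuns (List.dropWhile (· == c) t') := by
            simp only [pvEmitRun, pvInit, if_neg hO, List.cons_append] at ihh
            exact List.tail_eq_of_cons_eq ihh
          simp only [pvEmitRun, pvInit, pvRecA, pvStep, if_neg hO, if_true,
            List.cons_append, List.nil_append]
          rw [hrec]
          rw [show 1 + ((List.takeWhile (· == c) t').length + 1) - 1
                = (1 + (List.takeWhile (· == c) t').length - 1) + 1 by omega,
              List.replicate_succ, List.cons_append]
      · rw [pvBioRuns]
        have hbc : (c == h) = false := by simp [hc]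
        simp only [List.takeWhile_cons, List.dropWhile_cons, hbc, Bool.false_eq_true,
          if_false, List.length_nil, Nat.add_zero]
        have hemit : pvEmitRun h 1 = pvInit h := by
          by_cases hO : h = "O" <;> simp [pvEmitRun, pvInit, hO, List.replicate]
        rw [hemit, ← ih c]
        simp only [pvRecA, pvStep]
        congr 2
        by_cases hcO : c = "O"
        · simp [hcO, pvInit]
        · simp [hcO, hc, pvInit]

-- per-row equality on a nonempty filtered sequence
theorem pv_row (h : String) (t : List String) :
    (PySem.List.pyRange 1 (((h :: t).length : Nat) : Int) 1).foldl (fun f idx =>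
       f ++ [if PySem.List.pyGetD (h :: t) idx "" = "O" then "O"
             else if PySem.List.pyGetD (h :: t) idx "" = PySem.List.pyGetD (h :: t) (idx - 1) "" then "I-" ++ PySem.List.pyGetD (h :: t) idx ""
             else "B-" ++ PySem.List.pyGetD (h :: t) idx ""])
      (if PySem.List.pyGetD (h :: t) 0 "" = "O" then ["O"]
       else ["B-" ++ PySem.List.pyGetD (h :: t) 0 ""])
      = pvBioRuns (h :: t) := by
  have h0 : PySem.List.pyGetD (h :: t) 0 "" = h := PySem.List.pyGetD_zero_cons h t ""
  simp only [h0]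
  have hloop := pv_idxLoop t h (if h = "O" then ["O"] else ["B-" ++ h])
  simp only [pvStep] at hloop
  rw [hloop, ← pv_main t h]
  rfl

-- ===== VERDICT (by name: the statement is the Claim_ definition above) =====
theorem reconstruct_slot_bound_spec : Claim_equal_reconstruct_slot_bound := by
  intro so si sl _hdom hpre
  unfold Spec_reconstruct_slot_bound
  simp only [reconstruct_slot_bound, reconstruct_slot_bound_alt]
  rw [PySem.List.foldl_append_singleton_eq_map, List.nil_append,
      PySem.List.foldl_append_singleton_eq_map, List.nil_append]
  simp only [List.map_map]
  apply List.map_congr_left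
  intro pr hpr
  simp only [Function.comp]
  obtain ⟨⟨q, hq, hqne⟩, _⟩ := hpre pr hpr
  rw [pv_filt (fun p => PySem.List.pyGetD sl p ""), List.nil_append]
  set fs := ((pr.1.zip pr.2).filter (fun q => q.2 != -100)).map (fun q => PySem.List.pyGetD sl q.1 "") with hfs
  have hne : fs ≠ [] := by
    simp only [hfs, ne_eq, List.map_eq_nil_iff, List.filter_eq_nil_iff]
    intro hall
    exact absurd (by simpa using hqne) (by simpa using hall q hq)
  obtain ⟨h, t, hht⟩ := List.exists_cons_of_ne_nil hne
  rw [hht]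
  exact pv_row h t

@[simp]
theorem reconstruct_slot_bound_raises : Claim_raises_reconstruct_slot_bound := by
  unfold Claim_raises_reconstruct_slot_bound
  refine ⟨?_, by decide, by decide, by
    simp [pvRaiseWitness_reconstruct_slot_bound, pvRaiseWitnessOut_reconstruct_slot_bound,
      reconstruct_slot_bound_alt, pvBioRuns]⟩
  intro so si sl _hdom hr hpre
  obtain ⟨pr, hmem, hall⟩ := hr.2
  obtain ⟨⟨q, hq, hqne⟩, _⟩ := hpre pr hmem
  exact hqne (hall q hq)
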